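-- pv_equiv track=rewrite | github.com/daniel-dara/advent-of-code | 2015/day11/part2.py | hasTwoPairs
-- ===== SOURCE A (Python) =====
-- def hasTwoPairs(word):
-- 	pairs = None
--
-- 	for i in range(len(word) - 1):
-- 		if word[i] == word[i + 1]:
-- 			if pairs is None:
-- 				pairs = word[i]
-- 			elif pairs != word[i]:
-- 				return True
--
-- 	return False
-- ===== SOURCE B (Python) =====
-- def hasTwoPairs(word):
--     return sum(c + c in word for c in set(word)) > 1
-- ===== Notes on version B (the rewrite author's own statement) =====
-- stated objective: simpler
-- what changed: Instead of scanning adjacent positions with a first-pair sentinel and early return, B iterates over the distinct letters of the word and counts those whose doubled two-character substring c+c occurs in the word, returning whether that count exceeds 1.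
import Mathlib
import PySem

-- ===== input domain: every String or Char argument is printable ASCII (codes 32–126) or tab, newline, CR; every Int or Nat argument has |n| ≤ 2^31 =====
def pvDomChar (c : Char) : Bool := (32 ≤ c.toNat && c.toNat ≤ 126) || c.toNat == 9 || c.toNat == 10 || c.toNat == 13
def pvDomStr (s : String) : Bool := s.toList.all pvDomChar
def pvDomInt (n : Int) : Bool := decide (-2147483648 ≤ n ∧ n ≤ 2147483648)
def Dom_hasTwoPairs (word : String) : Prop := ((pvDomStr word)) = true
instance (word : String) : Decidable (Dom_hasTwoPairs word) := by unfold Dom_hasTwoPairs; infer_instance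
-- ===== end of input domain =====

-- B replaces A's adjacent-position scan (first-doubled-letter sentinel, early return) by counting,
-- over the distinct letters of the word, those whose doubled substring c+c occurs in the word
-- (objective: simpler).

-- ===== PORT A =====
-- A scans positions i, i+1 left to right keeping 'pairs' (None or the first doubled letter) and
-- returns True as soon as a doubled letter different from the remembered one appears.
def hasTwoPairsGo : List Char → Option Char → Bool
  | a :: b :: rest, pairs =>
      if a == b then
        match pairs with
        | none => hasTwoPairsGo (b :: rest) (some a)
        | some p => if p != a then true else hasTwoPairsGo (b :: rest) (some p)
      else hasTwoPairsGo (b :: rest) pairs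
  | _, _ => false

def hasTwoPairs (word : String) : Bool := hasTwoPairsGo word.toList none

-- ===== PORT B =====
-- return sum(c + c in word for c in set(word)) > 1
-- (the sum of the booleans is the count of set elements passing the test; iteration order of the
--  set cannot affect a sum, so countP over the PySem.Set is exact)
def hasTwoPairs_alt (word : String) : Bool :=
  decide (1 < (PySem.Set.ofList word.toList).countP
                (fun c => PySem.Chars.isIn [c, c] word.toList))

-- ===== PRECONDITION & SPEC =====
def Spec_hasTwoPairs (word : String) (out : Bool) : Prop := out = hasTwoPairs_alt word
instance (word : String) (out : Bool) : Decidable (Spec_hasTwoPairs word out) := by unfold Spec_hasTwoPairs; infer_instance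

-- ===== CLAIM (what is proved, stated in full; the proofs are below) =====
def Claim_equal_hasTwoPairs : Prop := ∀ (word : String), Dom_hasTwoPairs word → Spec_hasTwoPairs word (hasTwoPairs word)

-- ===== LEMMAS AND PROOFS =====

-- the list of doubled letters of l, in order (one entry per doubled position)
def dblList : List Char → List Char
  | a :: b :: rest => (if a = b then [a] else []) ++ dblList (b :: rest)
  | _ => []

-- A with a remembered letter p returns true iff some later doubled letter differs from p
theorem go_some (l : List Char) (p : Char) :
    hasTwoPairsGo l (some p) = (dblList l).any (fun c => c ≠ p) := by
  induction l with
  | nil => rfl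
  | cons a t ih =>
    match t with
    | [] => rfl
    | b :: rest =>
      rw [hasTwoPairsGo, dblList]
      by_cases hab : a = b
      · subst hab
        by_cases hpa : p = a
        · subst hpa
          simp [ih]
        · have h1 : (p != a) = true := by simp [hpa]
          have h2 : a ≠ p := fun h => hpa h.symm
          simp [h1, h2]
      · simp [hab, ih]

-- A from the initial None state: false until the first doubled letter c, then any-differs-from-c
theorem go_none (l : List Char) :
    hasTwoPairsGo l none =
      (match dblList l with
       | [] => false
       | c :: cs => cs.any (fun d => d ≠ c)) := by
  induction l with
  | nil => rfl
  | cons a t ih =>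
    match t with
    | [] => rfl
    | b :: rest =>
      rw [hasTwoPairsGo, dblList]
      by_cases hab : a = b
      · subst hab
        simp [go_some]
      · simp only [beq_iff_eq, if_neg hab, List.nil_append]
        simpa [hab] using ih

-- membership in dblList is exactly "cc occurs as a substring"
theorem mem_dblList_iff (l : List Char) (c : Char) :
    c ∈ dblList l ↔ [c, c] <:+: l := by
  induction l with
  | nil => simp [dblList]
  | cons a t ih =>
    match t with
    | [] =>
      simp only [dblList, List.not_mem_nil, false_iff]
      intro h
      have := h.length_le
      simp at this
    | b :: rest =>
      rw [dblList, List.infix_cons_iff]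
      constructor
      · intro h
        rcases List.mem_append.mp h with h | h
        · split_ifs at h with hab
          · left
            simp only [List.mem_singleton] at h
            subst h; subst hab
            exact ⟨rest, rfl⟩
          · simp at h
        · exact Or.inr ((ih).mp h)
      · rintro (h | h)
        · rcases h with ⟨s, hs⟩
          have hca : a = c := by
            have := congrArg (fun xs => xs.head?) hs
            simpa using this.symm
          have hcb : b = c := by
            have := congrArg (fun xs => xs.tail.head?) hs
            simpa using this.symm
          subst hca
          have hab : a = b := hcb.symm
          simp [hab]
        · exact List.mem_append_right _ ((ih).mpr h)

-- every doubled letter is a letter of the word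
theorem mem_of_mem_dblList (l : List Char) (c : Char) (h : c ∈ dblList l) : c ∈ l := by
  rcases (mem_dblList_iff l c).mp h with ⟨s, t, hst⟩
  subst hst
  simp

-- a Nodup list has length > 1 iff it contains two distinct elements
theorem nodup_len_gt_one {α : Type} (s : List α) (hn : s.Nodup) :
    (1 < s.length) ↔ ∃ x ∈ s, ∃ y ∈ s, x ≠ y := by
  match s with
  | [] => simp
  | [x] => simp
  | x :: y :: rest =>
    constructor
    · intro _
      refine ⟨x, by simp, y, by simp, ?_⟩
      intro h; subst h; simp at hn
    · intro _; simp

theorem exists_two_distinct_cons {α : Type} (c : α) (cs : List α) :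
    (∃ x ∈ c :: cs, ∃ y ∈ c :: cs, x ≠ y) ↔ ∃ d ∈ cs, d ≠ c := by
  constructor
  · rintro ⟨x, hx, y, hy, hxy⟩
    rcases List.mem_cons.mp hx with hx | hx
    · rcases List.mem_cons.mp hy with hy | hy
      · exact absurd (hx.trans hy.symm) hxy
      · exact ⟨y, hy, fun h => hxy (hx.trans h.symm)⟩
    · by_cases hxc : x = c
      · rcases List.mem_cons.mp hy with hy | hy
        · exact absurd (hxc.trans hy.symm) hxy
        · exact ⟨y, hy, fun h => hxy (hxc.trans h.symm)⟩
      · exact ⟨x, hx, hxc⟩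
  · rintro ⟨d, hd, hdc⟩
    exact ⟨c, by simp, d, by simp [hd], fun h => hdc h.symm⟩

-- B's count equals the number of distinct doubled letters
theorem countP_eq_len (l : List Char) :
    (PySem.Set.ofList l).countP (fun c => PySem.Chars.isIn [c, c] l)
      = (PySem.Set.ofList (dblList l)).length := by
  rw [List.countP_eq_length_filter]
  have hperm : ((PySem.Set.ofList l).filter (fun c => PySem.Chars.isIn [c, c] l)).Perm
      (PySem.Set.ofList (dblList l)) := by
    rw [List.perm_ext_iff_of_nodup
      ((PySem.Set.nodup_ofList l).filter _) (PySem.Set.nodup_ofList _)]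
    intro c
    simp only [List.mem_filter, PySem.Set.mem_ofList, mem_dblList_iff,
      PySem.Chars.isIn_iff_infix]
    constructor
    · rintro ⟨_, h⟩; exact h
    · intro h
      exact ⟨mem_of_mem_dblList l c ((mem_dblList_iff l c).mpr h), h⟩
  exact hperm.length_eq

-- ===== VERDICT (by name: the statement is the Claim_ definition above) =====
theorem hasTwoPairs_spec : Claim_equal_hasTwoPairs := by
  intro word _
  unfold Spec_hasTwoPairs hasTwoPairs hasTwoPairs_alt
  rw [countP_eq_len, go_none]
  set l := word.toList
  rw [Bool.eq_iff_iff, decide_eq_true_eq,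
    nodup_len_gt_one _ (PySem.Set.nodup_ofList _)]
  simp only [PySem.Set.mem_ofList]
  match hd : dblList l with
  | [] => simp
  | c :: cs =>
    rw [exists_two_distinct_cons]
    simp [List.any_eq_true]
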